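-- pv_equiv track=rewrite | github.com/LucasLara99/PDFtoExcelParser | PDFtoExcelParser.py | get_names_format2
-- ===== SOURCE A (Python) =====
-- def get_names_format2(array):
--    names = []
--    for i in range(len(array)):
--        if array[i] == 'GRAN':
--            name_end = i
--            while array[i] != 'SL':
--                name_start = i
--                i -= 1
--            name_array = array[name_start:name_end]
--            name = ' '.join(name_array)
--            names.append(name)
--    return names
-- ===== SOURCE B (Python) =====
-- def get_names_format2(array):
--     names = []
--     last_sl = -1
--     for i, s in enumerate(array):
--         if s == 'SL':
--             last_sl = i
--         elif s == 'GRAN':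
--             names.append(' '.join(array[last_sl + 1:i]))
--     return names
-- ===== Notes on version B (the rewrite author's own statement) =====
-- stated objective: alternative
-- what changed: B replaces A's backward while-loop re-scan at every 'GRAN' (with Python's negative-index wraparound) by a single forward pass that remembers the index of the last 'SL' seen and slices between it and the 'GRAN'.
-- intended difference: On lists where some 'GRAN' has no 'SL' before it and the list does not end in 'SL', A's backward scan wraps around to the end of the list and yields '' for that name, while B returns the words from the start of the list up to the 'GRAN' — the intended name. — e.g. on get_names_format2(["Bo", "GRAN", "SL", "x"]): A returns [""], B returns ["Bo"]
import Mathlib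
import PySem

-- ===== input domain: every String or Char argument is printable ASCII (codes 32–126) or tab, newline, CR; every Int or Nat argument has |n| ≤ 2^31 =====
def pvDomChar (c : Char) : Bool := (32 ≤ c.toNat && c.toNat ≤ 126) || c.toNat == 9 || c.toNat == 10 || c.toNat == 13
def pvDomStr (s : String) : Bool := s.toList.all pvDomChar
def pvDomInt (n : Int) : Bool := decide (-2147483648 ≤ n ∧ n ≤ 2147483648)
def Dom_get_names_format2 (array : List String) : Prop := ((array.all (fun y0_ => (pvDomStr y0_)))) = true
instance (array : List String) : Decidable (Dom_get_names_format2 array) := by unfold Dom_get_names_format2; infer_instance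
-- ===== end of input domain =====

-- B replaces A's backward re-scan at every 'GRAN' by a single forward pass that remembers the
-- index of the last 'SL' seen (objective: alternative — a one-pass stateful scan instead of a
-- backward scan per 'GRAN').

-- ===== PORT A =====
-- the inner 'while array[i] != 'SL': name_start = i; i -= 1' loop of A; ns is name_start.
-- fuel only makes the recursion structural: at the call site it is at least the number of
-- steps the Python loop can make before array[i] raises IndexError, so it never runs out
-- on an execution Python completes.  (Python leaves name_start unbound before the first
-- iteration; the loop always runs at least once at a 'GRAN', so the initial ns is never
-- returned on A's executions — we pass i.)
def pvAWhile (array : List String) (fuel : Nat) (i : Int) (ns : Int) : Int :=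
  match fuel with
  | 0 => ns
  | fuel + 1 =>
    match PySem.List.pyGet? array i with
    | none => ns                      -- Python raises IndexError here (outside Pre_)
    | some s => if s = "SL" then ns else pvAWhile array fuel (i - 1) i

def pvAStep (array : List String) (names : List String) (i : Int) : List String :=
  if PySem.List.pyGetD array i "" = "GRAN" then
    let name_end := i
    let name_start := pvAWhile array (i + array.length + 2).toNat i i
    let name_array := PySem.List.slice array (some name_start) (some name_end)
    let name := PySem.Str.join " " name_array
    names ++ [name]
  else names

def get_names_format2 (array : List String) : List String :=
  (PySem.List.pyRange 0 (array.length : Int) 1).foldl (pvAStep array) []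

-- ===== PORT B =====
def pvBStep (array : List String) (st : Int × List String) (p : Int × String) : Int × List String :=
  if p.2 = "SL" then (p.1, st.2)
  else if p.2 = "GRAN" then
    (st.1, st.2 ++ [PySem.Str.join " " (PySem.List.slice array (some (st.1 + 1)) (some p.1))])
  else st

def get_names_format2_alt (array : List String) : List String :=
  ((PySem.List.enumerate array 0).foldl (pvBStep array) (-1, [])).2

-- ===== PRECONDITION & SPEC =====
-- Pre_ excludes exactly the inputs where A raises IndexError: a 'GRAN' present with no 'SL'
-- anywhere in the list (A's backward scan wraps past index 0 and falls off the list).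
def Pre_get_names_format2 (array : List String) : Prop :=
  "GRAN" ∈ array → "SL" ∈ array
instance (array : List String) : Decidable (Pre_get_names_format2 array) := by
  unfold Pre_get_names_format2; infer_instance

def pvWitness_get_names_format2 : List String := ["SL", "Ana", "GRAN"]

-- On lists where some 'GRAN' has no 'SL' before it and the list does not end in 'SL', A's
-- backward scan wraps around via negative indexing and returns '' for that name, while B
-- returns the words from the start of the list up to that 'GRAN' — the intended name.
def D_get_names_format2 (array : List String) : Prop :=
  "SL" ∈ array ∧ array.getD (array.length - 1) "" ≠ "SL" ∧
    ∃ i, i < array.length ∧ array.getD i "" = "GRAN" ∧ "SL" ∉ array.take i ∧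
      (2 ≤ i ∨ (i = 1 ∧ array.getD 0 "" ≠ ""))
instance (array : List String) : Decidable (D_get_names_format2 array) := by
  unfold D_get_names_format2; infer_instance

def Spec_get_names_format2 (array : List String) (out : List String) : Prop :=
  ¬ D_get_names_format2 array → out = get_names_format2_alt array
instance (array : List String) (out : List String) : Decidable (Spec_get_names_format2 array out) := by
  unfold Spec_get_names_format2; infer_instance

def pvDiffWitness_get_names_format2 : List String := ["Bo", "GRAN", "SL", "x"]
def pvDiffWitnessOut_get_names_format2 : (List String) × (List String) := ([""], ["Bo"])

-- ===== CLAIM (what is proved, stated in full; the proofs are below) =====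
def Claim_unchanged_get_names_format2 : Prop := ∀ (array : List String), Dom_get_names_format2 array → Pre_get_names_format2 array → Spec_get_names_format2 array (get_names_format2 array)
def Claim_changed_get_names_format2 : Prop := Dom_get_names_format2 (pvDiffWitness_get_names_format2) ∧ Pre_get_names_format2 (pvDiffWitness_get_names_format2) ∧ D_get_names_format2 (pvDiffWitness_get_names_format2) ∧ get_names_format2 (pvDiffWitness_get_names_format2) = pvDiffWitnessOut_get_names_format2.1 ∧ get_names_format2_alt (pvDiffWitness_get_names_format2) = pvDiffWitnessOut_get_names_format2.2 ∧ pvDiffWitnessOut_get_names_format2.1 ≠ pvDiffWitnessOut_get_names_format2.2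
def Claim_exact_get_names_format2 : Prop := ∀ (array : List String), Dom_get_names_format2 array → Pre_get_names_format2 array → D_get_names_format2 array → get_names_format2 array ≠ get_names_format2_alt array

-- ===== LEMMAS AND PROOFS =====

-- index of the last 'SL' strictly before position k, or -1 if there is none
def pvLastSL (array : List String) (k : Nat) : Int :=
  (List.range k).foldl (fun acc j => if array.getD j "" = "SL" then (j : Int) else acc) (-1)

theorem pvLastSL_succ (array : List String) (k : Nat) :
    pvLastSL array (k + 1) = if array.getD k "" = "SL" then (k : Int) else pvLastSL array k := by
  unfold pvLastSL
  rw [List.range_succ, List.foldl_append]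
  simp [List.foldl]

theorem pvLastSL_of_forall (array : List String) (k : Nat)
    (h : ∀ j, j < k → array.getD j "" ≠ "SL") : pvLastSL array k = -1 := by
  induction k with
  | zero => rfl
  | succ k ih =>
    rw [pvLastSL_succ, if_neg (h k (by omega))]
    exact ih (fun j hj => h j (by omega))

theorem pvLastSL_spec (array : List String) (k : Nat) (h : "SL" ∈ array.take k) :
    0 ≤ pvLastSL array k ∧ pvLastSL array k < k ∧
      array.getD (pvLastSL array k).toNat "" = "SL" ∧
      ∀ j, (pvLastSL array k).toNat < j → j < k → array.getD j "" ≠ "SL" := by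
  induction k with
  | zero => simp at h
  | succ k ih =>
    rw [pvLastSL_succ]
    by_cases hks : array.getD k "" = "SL"
    · rw [if_pos hks]
      refine ⟨by positivity, by push_cast; omega, by simpa using hks, fun j hj hj2 => ?_⟩
      simp at hj; omega
    · rw [if_neg hks]
      have hmem : "SL" ∈ array.take k := by
        by_cases hkn : k < array.length
        · rw [List.take_succ] at h
          rcases List.mem_append.mp h with h' | h'
          · exact h'
          · exfalso
            rw [List.getElem?_eq_getElem hkn] at h'
            simp at h'
            exact hks (by rw [List.getD_eq_getElem array "" hkn]; exact h'.symm)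
        · rw [List.take_of_length_le (by omega)] at h
          rw [List.take_of_length_le (by omega)]
          exact h
      obtain ⟨h1, h2, h3, h4⟩ := ih hmem
      refine ⟨h1, by omega, h3, fun j hj hj2 => ?_⟩
      rcases Nat.lt_or_ge j k with hlt | hge
      · exact h4 j hj hlt
      · have : j = k := by omega
        subst this; exact hks


theorem pvMem_take_mono {α : Type} {l : List α} {x : α} {a b : Nat}
    (h : x ∈ l.take a) (hab : a ≤ b) : x ∈ l.take b := by
  have ht := List.take_take (i := a) (j := b) (l := l)
  rw [Nat.min_eq_left hab] at ht
  rw [← ht] at h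
  exact List.mem_of_mem_take h

theorem pvPyGet?_pos (xs : List String) (k : Nat) (h : k < xs.length) :
    PySem.List.pyGet? xs (k : Int) = some xs[k] := by
  simp [PySem.List.pyGet?_natCast, List.getElem?_eq_getElem h]

theorem pvPyGet?_negwrap (xs : List String) (k : Nat) (h : k < xs.length) :
    PySem.List.pyGet? xs (-(xs.length : Int) + k) = some xs[k] := by
  have h1 : ¬ (0 ≤ -(xs.length : Int) + k) := by omega
  have h2 : -(xs.length : Int) ≤ -(xs.length : Int) + k := by omega
  simp only [PySem.List.pyGet?, PySem.List.pyIdx?, if_neg h1, if_pos h2]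
  have h3 : (-(-(xs.length : Int) + k)).toNat = xs.length - k := by omega
  rw [h3]
  have h4 : xs.length - (xs.length - k) = k := by omega
  simp [h4, List.getElem?_eq_getElem h]

theorem pvPyGet?_below (xs : List String) (i : Int) (h : i < -(xs.length : Int)) :
    PySem.List.pyGet? xs i = none := by
  simp only [PySem.List.pyGet?, PySem.List.pyIdx?, if_neg (by omega : ¬ (0 ≤ i)),
    if_neg (by omega : ¬ (-(xs.length : Int) ≤ i))]
  rfl

-- A's inner loop when an 'SL' occurs at or before k
theorem pvAWhile_stop (array : List String) (k : Nat) (hk : k < array.length)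
    (hmem : "SL" ∈ array.take (k + 1)) (fuel : Nat) (hf : k + 1 ≤ fuel) (ns : Int) :
    pvAWhile array fuel k ns =
      if array.getD k "" = "SL" then ns else pvLastSL array (k + 1) + 1 := by
  induction k generalizing fuel ns with
  | zero =>
    obtain ⟨f, rfl⟩ : ∃ f, fuel = f + 1 := ⟨fuel - 1, by omega⟩
    have hel : array.getD 0 "" = array[0] := List.getD_eq_getElem array "" hk
    have hsl : array[0] = "SL" := by
      rw [List.take_add_one, List.take_zero, List.getElem?_eq_getElem hk] at hmem
      simp at hmem; exact hmem.symm
    have h0 : PySem.List.pyGet? array 0 = some array[0] := by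
      simpa using pvPyGet?_pos array 0 hk
    simp only [pvAWhile, Nat.cast_zero, h0]
    rw [if_pos hsl, if_pos (by rw [hel]; exact hsl)]
  | succ k ih =>
    obtain ⟨f, rfl⟩ : ∃ f, fuel = f + 1 := ⟨fuel - 1, by omega⟩
    have hel : array.getD (k + 1) "" = array[k + 1] := List.getD_eq_getElem array "" hk
    simp only [pvAWhile, pvPyGet?_pos array (k + 1) hk]
    by_cases hs : array[k + 1] = "SL"
    · rw [if_pos hs, if_pos (by rw [hel]; exact hs)]
    · rw [if_neg hs, if_neg (by rw [hel]; exact hs)]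
      have hmem' : "SL" ∈ array.take (k + 1) := by
        rw [List.take_add_one (i := k + 1), List.getElem?_eq_getElem hk] at hmem
        rcases List.mem_append.mp hmem with h' | h'
        · exact h'
        · simp at h'; exact absurd h'.symm hs
      rw [show (((k + 1 : Nat) : Int) - 1) = ((k : Nat) : Int) by push_cast; ring,
        ih (by omega) hmem' f (by omega) ((k + 1 : Nat) : Int)]
      conv_rhs => rw [pvLastSL_succ array (k + 1), if_neg (show ¬ array.getD (k + 1) "" = "SL" by rw [hel]; exact hs)]
      split_ifs with h2
      · rw [pvLastSL_succ array k, if_pos h2]; push_cast; ring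
      · rw [pvLastSL_succ array k, if_neg h2]

-- A's inner loop after wrapping to negative indices
theorem pvAWhile_wrap (array : List String) (m : Nat) (hm : m < array.length)
    (fuel : Nat) (hf : m + 2 ≤ fuel) :
    pvAWhile array fuel (-(array.length : Int) + m) (1 - ((array.length : Int) - m)) =
      if "SL" ∈ array.take (m + 1) then pvLastSL array (m + 1) + 1 - array.length
      else -(array.length : Int) := by
  induction m generalizing fuel with
  | zero =>
    obtain ⟨f, rfl⟩ : ∃ f, fuel = f + 1 := ⟨fuel - 1, by omega⟩
    have hel : array.getD 0 "" = array[0] := List.getD_eq_getElem array "" hm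
    have h0 : PySem.List.pyGet? array (-(array.length : Int) + ((0 : Nat) : Int)) = some array[0] :=
      pvPyGet?_negwrap array 0 hm
    simp only [Nat.cast_zero] at h0
    simp only [pvAWhile, Nat.cast_zero, h0]
    by_cases hs : array[0] = "SL"
    · have hmem : "SL" ∈ array.take (0 + 1) := by
        rw [List.take_add_one, List.take_zero, List.getElem?_eq_getElem hm]
        simp [hs]
      rw [if_pos hs, if_pos hmem, pvLastSL_succ, if_pos (by rw [hel]; exact hs)]
      push_cast; ring
    · rw [if_neg hs]
      obtain ⟨g, rfl⟩ : ∃ g, f = g + 1 := ⟨f - 1, by omega⟩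
      have hnone : PySem.List.pyGet? array (-(array.length : Int) + 0 - 1) = none :=
        pvPyGet?_below array _ (by omega)
      simp only [pvAWhile, hnone]
      rw [if_neg (by
        intro hmem
        rw [List.take_add_one, List.take_zero, List.getElem?_eq_getElem hm] at hmem
        simp at hmem
        exact hs hmem.symm)]
      ring
  | succ m ih =>
    obtain ⟨f, rfl⟩ : ∃ f, fuel = f + 1 := ⟨fuel - 1, by omega⟩
    have hel : array.getD (m + 1) "" = array[m + 1] := List.getD_eq_getElem array "" hm
    simp only [pvAWhile, pvPyGet?_negwrap array (m + 1) hm]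
    by_cases hs : array[m + 1] = "SL"
    · have hmem : "SL" ∈ array.take (m + 1 + 1) := by
        rw [List.take_add_one (i := m + 1), List.getElem?_eq_getElem hm]
        simp [hs]
      rw [if_pos hs, if_pos hmem, pvLastSL_succ, if_pos (by rw [hel]; exact hs)]
      push_cast; ring
    · rw [if_neg hs]
      have harg : -(array.length : Int) + ((m + 1 : Nat) : Int) - 1 = -(array.length : Int) + ((m : Nat) : Int) := by
        push_cast; ring
      have hns : -(array.length : Int) + ((m + 1 : Nat) : Int) = 1 - ((array.length : Int) - ((m : Nat) : Int)) := by
        push_cast; ring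
      rw [harg, hns, ih (by omega) f (by omega)]
      have hiff : ("SL" ∈ array.take (m + 1 + 1)) ↔ ("SL" ∈ array.take (m + 1)) := by
        constructor
        · intro h'
          rw [List.take_add_one (i := m + 1), List.getElem?_eq_getElem hm] at h'
          rcases List.mem_append.mp h' with h'' | h''
          · exact h''
          · simp at h''; exact absurd h''.symm hs
        · intro h'; exact pvMem_take_mono h' (by omega)
      conv_rhs => rw [pvLastSL_succ array (m + 1)]
      rw [if_neg (show ¬ array.getD (m + 1) "" = "SL" by rw [hel]; exact hs)]
      split_ifs with h1 h2 h3
      · rfl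
      · exact absurd (hiff.mpr h1) h2
      · exact absurd (hiff.mp h3) h1
      · rfl

-- A's inner loop descends to -1 when no 'SL' occurs at or before k
theorem pvAWhile_desc (array : List String) (k : Nat) (hk : k < array.length)
    (hnot : "SL" ∉ array.take (k + 1)) (fuel : Nat) (ns : Int) :
    pvAWhile array (fuel + (k + 1)) k ns = pvAWhile array fuel (-1) 0 := by
  induction k generalizing ns with
  | zero =>
    have hs : array[0] ≠ "SL" := by
      intro h
      exact hnot (by rw [List.take_add_one, List.take_zero, List.getElem?_eq_getElem hk]; simp [h])
    have h0 : PySem.List.pyGet? array 0 = some array[0] := by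
      simpa using pvPyGet?_pos array 0 hk
    simp only [pvAWhile, Nat.cast_zero, h0]
    rw [if_neg hs]
    norm_num
  | succ k ih =>
    have hs : array[k + 1] ≠ "SL" := by
      intro h
      exact hnot (by rw [List.take_add_one (i := k + 1), List.getElem?_eq_getElem hk]; simp [h])
    rw [show fuel + (k + 1 + 1) = (fuel + (k + 1)) + 1 by omega]
    simp only [pvAWhile, pvPyGet?_pos array (k + 1) hk]
    rw [if_neg hs,
      show (((k + 1 : Nat) : Int) - 1) = ((k : Nat) : Int) by push_cast; ring]
    exact ih (by omega) (fun h => hnot (pvMem_take_mono h (by omega))) _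

-- A's inner loop at an orphan 'GRAN': no 'SL' at or before k, but one later
theorem pvAWhile_orphan (array : List String) (k : Nat) (hk : k < array.length)
    (hnot : "SL" ∉ array.take (k + 1)) (hSL : "SL" ∈ array) (ns : Int) :
    pvAWhile array (k + array.length + 2) k ns = pvLastSL array array.length + 1 - array.length := by
  have hn : 1 ≤ array.length := by omega
  rw [show k + array.length + 2 = (array.length + 1) + (k + 1) by omega,
    pvAWhile_desc array k hk hnot (array.length + 1) ns]
  have harg : (-1 : Int) = -(array.length : Int) + ((array.length - 1 : Nat) : Int) := by
    push_cast [hn]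
    ring
  have hns : (0 : Int) = 1 - ((array.length : Int) - ((array.length - 1 : Nat) : Int)) := by
    push_cast [hn]; ring
  rw [harg, hns, pvAWhile_wrap array (array.length - 1) (by omega) (array.length + 1) (by omega)]
  rw [show array.length - 1 + 1 = array.length by omega]
  rw [if_pos (by rw [List.take_of_length_le (by omega)]; exact hSL)]

-- per-GRAN name computed by A
def pvAName (array : List String) (k : Nat) : String :=
  PySem.Str.join " " (PySem.List.slice array (some (pvAWhile array (k + array.length + 2) k k)) (some (k : Int)))

-- per-GRAN name computed by B
def pvBName (array : List String) (k : Nat) : String :=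
  PySem.Str.join " " (PySem.List.slice array (some (pvLastSL array k + 1)) (some (k : Int)))

theorem pvGetD_mem_take (l : List String) (j k : Nat) (h1 : j < k) (h2 : j < l.length) :
    l.getD j "" ∈ l.take k := by
  rw [List.getD_eq_getElem l "" h2]
  have hm : (l.take k)[j]'(by rw [List.length_take]; omega) ∈ l.take k :=
    List.getElem_mem (by rw [List.length_take]; omega)
  rwa [List.getElem_take] at hm

theorem pvA_fold (array : List String) (m : Nat) (acc : List String) :
    (PySem.List.pyRange 0 (m : Int) 1).foldl (pvAStep array) acc =
      acc ++ (List.range m).flatMap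
        (fun k => if array.getD k "" = "GRAN" then [pvAName array k] else []) := by
  induction m generalizing acc with
  | zero => simp [PySem.List.pyRange_one_eq_nil (le_refl 0)]
  | succ m ih =>
    rw [show ((m + 1 : Nat) : Int) = (m : Int) + 1 by push_cast; ring,
      PySem.List.pyRange_one_succ_right (by positivity), List.foldl_append, ih]
    simp only [List.foldl_cons, List.foldl_nil]
    rw [List.range_succ, List.flatMap_append, List.flatMap_singleton]
    unfold pvAStep
    rw [PySem.List.pyGetD_natCast]
    unfold pvAName
    rw [show ((m : Int) + array.length + 2).toNat = m + array.length + 2 by omega]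
    split_ifs with h
    · rw [List.append_assoc]
    · rw [List.append_nil]

theorem pvA_eq_flat (array : List String) :
    get_names_format2 array =
      (List.range array.length).flatMap
        (fun k => if array.getD k "" = "GRAN" then [pvAName array k] else []) := by
  unfold get_names_format2
  exact pvA_fold array array.length []

theorem pvB_fold (array : List String) (suffix : List String) :
    ∀ (s : Nat) (acc : List String), suffix = array.drop s →
    ((PySem.List.enumerate suffix (s : Int)).foldl (pvBStep array) (pvLastSL array s, acc)).2 =
      acc ++ (List.range' s suffix.length).flatMap
        (fun k => if array.getD k "" = "GRAN" then [pvBName array k] else []) := by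
  induction suffix with
  | nil => intro s acc h; simp [PySem.List.enumerate_nil]
  | cons x rest ih =>
    intro s acc h
    have hs : s < array.length := by
      have := congrArg List.length h
      simp [List.length_drop] at this
      omega
    have hx : x = array.getD s "" := by
      have h0 := congrArg (fun l => l[0]?) h
      simp only [List.getElem?_cons_zero] at h0
      rw [List.getElem?_drop, Nat.add_zero, List.getElem?_eq_getElem hs] at h0
      rw [List.getD_eq_getElem array "" hs]
      exact Option.some.inj h0
    have hrest : rest = array.drop (s + 1) := by
      have ht := congrArg List.tail h
      simpa [List.tail_drop] using ht
    rw [PySem.List.enumerate_cons, List.foldl_cons]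
    have hlen : (x :: rest).length = rest.length + 1 := rfl
    rw [hlen, List.range'_succ, List.flatMap_cons]
    have hcast : ((s : Int) + 1) = ((s + 1 : Nat) : Int) := by push_cast; ring
    by_cases hxsl : x = "SL"
    · have hstep : pvBStep array (pvLastSL array s, acc) ((s : Int), x) = ((s : Int), acc) := by
        unfold pvBStep; rw [if_pos hxsl]
      have hl : ((s : Int)) = pvLastSL array (s + 1) := by
        rw [pvLastSL_succ, if_pos (by rw [← hx]; exact hxsl)]
      rw [hstep, hcast, show ((s : Int)) = pvLastSL array (s + 1) from hl,
        ih (s + 1) acc hrest]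
      rw [if_neg (by rw [← hx, hxsl]; simp), List.nil_append]
    · by_cases hxg : x = "GRAN"
      · have hstep : pvBStep array (pvLastSL array s, acc) ((s : Int), x) =
            (pvLastSL array s, acc ++ [pvBName array s]) := by
          unfold pvBStep; rw [if_neg hxsl, if_pos hxg]; rfl
        have hl : pvLastSL array (s + 1) = pvLastSL array s := by
          rw [pvLastSL_succ, if_neg (by rw [← hx]; exact hxsl)]
        rw [hstep, ← hl, hcast, ih (s + 1) (acc ++ [pvBName array s]) hrest]
        rw [if_pos (by rw [← hx]; exact hxg), List.append_assoc]
      · have hstep : pvBStep array (pvLastSL array s, acc) ((s : Int), x) =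
            (pvLastSL array s, acc) := by
          unfold pvBStep; rw [if_neg hxsl, if_neg hxg]
        have hl : pvLastSL array (s + 1) = pvLastSL array s := by
          rw [pvLastSL_succ, if_neg (by rw [← hx]; exact hxsl)]
        rw [hstep, ← hl, hcast, ih (s + 1) acc hrest]
        rw [if_neg (by rw [← hx]; exact hxg), List.nil_append]

theorem pvB_eq_flat (array : List String) :
    get_names_format2_alt array =
      (List.range array.length).flatMap
        (fun k => if array.getD k "" = "GRAN" then [pvBName array k] else []) := by
  unfold get_names_format2_alt
  have h0 : ((-1 : Int)) = pvLastSL array 0 := rfl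
  have := pvB_fold array array 0 [] (by simp)
  simp only [Nat.cast_zero] at this
  rw [h0, this, List.nil_append, List.range_eq_range']

theorem pvFlat_filter (array : List String) (f : Nat → String) (l : List Nat) :
    l.flatMap (fun k => if array.getD k "" = "GRAN" then [f k] else []) =
      (l.filter (fun k => array.getD k "" == "GRAN")).map f := by
  induction l with
  | nil => rfl
  | cons a l ih =>
    rw [List.flatMap_cons, List.filter_cons, ih]
    by_cases h : array.getD a "" = "GRAN"
    · rw [if_pos h, if_pos (show (array.getD a "" == "GRAN") = true by simp only [beq_iff_eq]; exact h),
        List.map_cons, List.singleton_append]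
    · rw [if_neg h, if_neg (show ¬ (array.getD a "" == "GRAN") = true by simp only [beq_iff_eq]; exact h),
        List.nil_append]

theorem pvJoin_two_ne (a b : String) (l : List String) : PySem.Str.join " " (a :: b :: l) ≠ "" := by
  intro h
  have := congrArg String.toList h
  simp [PySem.Str.join, PySem.Chars.join_cons_cons] at this

theorem pvJoin_one (s : String) : PySem.Str.join " " [s] = s := by
  simp [PySem.Str.join, PySem.Chars.join_singleton]

theorem pvAName_orphan_empty (array : List String) (k : Nat) (hk : k < array.length)
    (hmem : "SL" ∉ array.take (k + 1)) (hSL : "SL" ∈ array)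
    (hlast : ¬ array.getD (array.length - 1) "" = "SL") : pvAName array k = "" := by
  unfold pvAName
  rw [pvAWhile_orphan array k hk hmem hSL (k : Int)]
  obtain ⟨hJ0, hJn, hJsl, hJlast⟩ := pvLastSL_spec array array.length (by rwa [List.take_length])
  have hJk : (k : Int) < pvLastSL array array.length := by
    by_contra hc
    push_neg at hc
    exact hmem (hJsl ▸ pvGetD_mem_take array (pvLastSL array array.length).toNat (k + 1)
      (by omega) (by omega))
  have hJle : pvLastSL array array.length ≤ (array.length : Int) - 2 := by
    have hne : (pvLastSL array array.length).toNat ≠ array.length - 1 :=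
      fun he => hlast (he ▸ hJsl)
    omega
  have hA : PySem.List.slice array (some (pvLastSL array array.length + 1 - array.length))
      (some (k : Int)) = [] := by
    simp only [PySem.List.slice, PySem.List.clampIdx]
    rw [if_neg (by omega : ¬ ((k : Int) < 0)),
      if_pos (by omega : pvLastSL array array.length + 1 - (array.length : Int) < 0),
      if_neg (by omega : ¬ ((array.length : Int) + (pvLastSL array array.length + 1 - array.length) < 0))]
    have hz : min (k : Int).toNat array.length -
        ((array.length : Int) + (pvLastSL array array.length + 1 - array.length)).toNat = 0 := by
      omega
    rw [hz, List.take_zero]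
  rw [hA]
  rfl

theorem pvName_eq (array : List String) (hPre : Pre_get_names_format2 array)
    (hnD : ¬ D_get_names_format2 array) (k : Nat) (hk : k < array.length)
    (hG : array.getD k "" = "GRAN") : pvAName array k = pvBName array k := by
  have hnsl : ¬ array.getD k "" = "SL" := by rw [hG]; simp
  unfold pvAName pvBName
  by_cases hmem : "SL" ∈ array.take (k + 1)
  · rw [pvAWhile_stop array k hk hmem (k + array.length + 2) (by omega) (k : Int),
      if_neg hnsl, pvLastSL_succ, if_neg hnsl]
  · have hGmem : "GRAN" ∈ array := by
      rw [List.getD_eq_getElem array "" hk] at hG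
      exact hG ▸ List.getElem_mem hk
    have hSL : "SL" ∈ array := hPre hGmem
    rw [pvAWhile_orphan array k hk hmem hSL (k : Int)]
    have hBl : pvLastSL array k = -1 :=
      pvLastSL_of_forall array k (fun j hj hgd =>
        hmem (hgd ▸ pvGetD_mem_take array j (k + 1) (by omega) (by omega)))
    have hspec := pvLastSL_spec array array.length (by rwa [List.take_length])
    obtain ⟨hJ0, hJn, hJsl, hJlast⟩ := hspec
    have hJk : (k : Int) < pvLastSL array array.length := by
      by_contra hc
      push_neg at hc
      exact hmem (hJsl ▸ pvGetD_mem_take array (pvLastSL array array.length).toNat (k + 1)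
        (by omega) (by omega))
    by_cases hlast : array.getD (array.length - 1) "" = "SL"
    · have hJeq : pvLastSL array array.length = (array.length : Int) - 1 := by
        by_contra hne
        exact hJlast (array.length - 1) (by omega) (by omega) hlast
      rw [hJeq, hBl]
      norm_num
    · have hcl : k = 0 ∨ (k = 1 ∧ array.getD 0 "" = "") := by
        by_contra hcl
        push_neg at hcl
        apply hnD
        refine ⟨hSL, hlast, k, hk, hG,
          fun hm => hmem (pvMem_take_mono hm (by omega)), ?_⟩
        by_cases h1 : k = 1
        · exact Or.inr ⟨h1, hcl.2 h1⟩
        · exact Or.inl (by omega)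
      have hA : PySem.Str.join " " (PySem.List.slice array
          (some (pvLastSL array array.length + 1 - array.length)) (some (k : Int))) = "" := by
        have := pvAName_orphan_empty array k hk hmem hSL hlast
        unfold pvAName at this
        rwa [pvAWhile_orphan array k hk hmem hSL (k : Int)] at this
      rw [hA, hBl]
      rcases hcl with h0 | ⟨h1, he⟩
      · subst h0
        have hB : PySem.List.slice array (some (-1 + 1)) (some ((0 : Nat) : Int)) = [] := by
          simp only [PySem.List.slice, PySem.List.clampIdx]
          norm_num
        rw [hB]
        rfl
      · subst h1
        obtain ⟨a0, rest, rfl⟩ : ∃ a0 rest, array = a0 :: rest := by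
          cases array with
          | nil => simp at hk
          | cons a0 rest => exact ⟨a0, rest, rfl⟩
        have ha0 : a0 = "" := by simpa using he
        subst ha0
        have hB : PySem.List.slice ("" :: rest) (some (-1 + 1)) (some ((1 : Nat) : Int)) = [""] := by
          simp only [PySem.List.slice, PySem.List.clampIdx]
          norm_num
        rw [hB]
        rfl

-- ===== VERDICT (by name: the statement is the Claim_ definition above) =====
theorem get_names_format2_spec : Claim_unchanged_get_names_format2 := by
  intro array _ hPre hnD
  show get_names_format2 array = get_names_format2_alt array
  rw [pvA_eq_flat, pvB_eq_flat]
  unfold List.flatMap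
  refine congrArg List.flatten (List.map_congr_left (fun k hkm => ?_))
  have hk : k < array.length := List.mem_range.mp hkm
  by_cases hG : array.getD k "" = "GRAN"
  · rw [if_pos hG, if_pos hG, pvName_eq array hPre hnD k hk hG]
  · rw [if_neg hG, if_neg hG]

theorem get_names_format2_changed : Claim_changed_get_names_format2 := by
  unfold Claim_changed_get_names_format2; decide

theorem get_names_format2_tight : Claim_exact_get_names_format2 := by
  unfold Claim_exact_get_names_format2
  intro array _ hPre hD heq
  obtain ⟨hSL, hlast, k, hk, hG, hnotk, hclause⟩ := hD
  rw [pvA_eq_flat, pvB_eq_flat, pvFlat_filter array (pvAName array),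
    pvFlat_filter array (pvBName array)] at heq
  have hpt := List.map_inj_left.mp heq k
    (List.mem_filter.mpr ⟨List.mem_range.mpr hk, by simp only [beq_iff_eq]; exact hG⟩)
  have hmem1 : "SL" ∉ array.take (k + 1) := by
    intro hm
    rw [List.take_add_one, List.getElem?_eq_getElem hk] at hm
    rcases List.mem_append.mp hm with h' | h'
    · exact hnotk h'
    · simp at h'
      rw [List.getD_eq_getElem array "" hk] at hG
      rw [← h'] at hG
      exact absurd hG (by decide)
  rw [pvAName_orphan_empty array k hk hmem1 hSL hlast] at hpt
  have hBl : pvLastSL array k = -1 :=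
    pvLastSL_of_forall array k (fun j hj hgd =>
      hnotk (hgd ▸ pvGetD_mem_take array j k hj (by omega)))
  unfold pvBName at hpt
  rw [hBl] at hpt
  have hsl : PySem.List.slice array (some (-1 + 1)) (some (k : Int)) = array.take k := by
    rw [show (-1 + 1 : Int) = ((0 : Nat) : Int) by norm_num, PySem.List.slice_natCast]
    simp
  rw [hsl] at hpt
  rcases hclause with h2 | ⟨h1, h0⟩
  · obtain ⟨m, rfl⟩ : ∃ m, k = m + 2 := ⟨k - 2, by omega⟩
    obtain ⟨a0, a1, rest, rfl⟩ : ∃ a0 a1 rest, array = a0 :: a1 :: rest := by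
      cases array with
      | nil => simp at hk
      | cons a0 t =>
        cases t with
        | nil => exact absurd hk (by simp)
        | cons a1 rest => exact ⟨a0, a1, rest, rfl⟩
    rw [List.take_succ_cons, List.take_succ_cons] at hpt
    exact pvJoin_two_ne a0 a1 _ hpt.symm
  · subst h1
    obtain ⟨a0, rest, rfl⟩ : ∃ a0 rest, array = a0 :: rest := by
      cases array with
      | nil => simp at hk
      | cons a0 rest => exact ⟨a0, rest, rfl⟩
    rw [List.take_succ_cons, List.take_zero, pvJoin_one] at hpt
    exact h0 (by simpa using hpt.symm)
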